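-- pv_equiv track=rewrite | github.com/Jason003/interview | intuit/courses.py | courseHelper
-- ===== SOURCE A (Python) =====
-- import collections
--
-- def courseHelper(coursesRelation):
--     # time: O(V! + E) space: O(V + E)
--     allCourses = set()
--     pre = collections.defaultdict(set)
--     is_pre = collections.defaultdict(set)
--     for i, j in coursesRelation:
--         allCourses.add(i)
--         allCourses.add(j)
--         is_pre[j].add(i)
--         pre[i].add(j)
--
--     res = set()
--
--     def dfs(path, seen, course):
--         if len(path) == len(allCourses):
--             res.add(tuple(path))
--             return
--         if course in seen or pre[course]:
--             return
--         mark = set()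
--         for i in is_pre[course]:
--             pre[i].discard(course)
--             mark.add(i)
--         for i in allCourses - seen:
--             dfs(path + [course], seen | {course}, i)
--         for i in mark:
--             pre[i].add(course)
--
--     for i in allCourses:
--         dfs([], set(), i)
--
--     return res
-- ===== SOURCE B (Python) =====
-- import collections
--
-- def courseHelper(coursesRelation):
--     node_set = set()
--     prereqs = collections.defaultdict(set)
--     dependents = collections.defaultdict(set)
--     for i, j in coursesRelation:
--         node_set.add(i)
--         node_set.add(j)
--         prereqs[i].add(j)
--         dependents[j].add(i)
--     indeg = {v: len(prereqs[v]) for v in node_set}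
--     n = len(node_set)
--     res = set()
--     path = []
--     taken = set()
--
--     def backtrack(rest):
--         if len(path) == n:
--             res.add(tuple(path))
--             return
--         for v in rest:
--             if v in taken or indeg[v] != 0:
--                 continue
--             cands = node_set - taken
--             taken.add(v)
--             path.append(v)
--             for d in dependents[v]:
--                 indeg[d] -= 1
--             backtrack(cands)
--             for d in dependents[v]:
--                 indeg[d] += 1
--             path.pop()
--             taken.discard(v)
--
--     if node_set:
--         backtrack(node_set)
--     return res
-- ===== Notes on version B (the rewrite author's own statement) =====
-- stated objective: alternative
-- what changed: Replaces A's per-candidate DFS that copies path/seen into fresh sets at every probe and tracks remaining-prerequisite SETS mutated and restored through an inverse-edge dict, by all-topological-sorts backtracking on integer in-degree counters with one in-place path/taken state (the remaining-course frontier is still enumerated from the same set objects, so the result set is built in the same order).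
import Mathlib
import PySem

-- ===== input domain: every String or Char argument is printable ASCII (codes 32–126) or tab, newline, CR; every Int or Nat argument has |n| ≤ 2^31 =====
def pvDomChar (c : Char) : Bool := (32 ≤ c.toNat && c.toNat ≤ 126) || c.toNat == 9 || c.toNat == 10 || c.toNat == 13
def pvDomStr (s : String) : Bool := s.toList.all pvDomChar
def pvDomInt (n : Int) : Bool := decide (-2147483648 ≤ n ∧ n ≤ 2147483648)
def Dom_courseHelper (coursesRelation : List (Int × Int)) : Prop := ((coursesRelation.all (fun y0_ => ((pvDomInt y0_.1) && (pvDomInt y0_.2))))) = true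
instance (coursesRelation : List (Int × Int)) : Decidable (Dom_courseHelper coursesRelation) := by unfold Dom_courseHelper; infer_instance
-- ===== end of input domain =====

-- B replaces A's copy-heavy DFS over every unvisited course (availability kept as mutable
-- remaining-prerequisite SETS, undone via an inverse-edge dict) by all-topological-sorts
-- backtracking on integer in-degree counters with one in-place path/taken state; it
-- enumerates the remaining-course frontier from the same set objects A iterates, so it
-- builds the same result set in the same order.  The return value is a Python set: its
-- membership is independent of Python's set iteration order, and the ports hold it in
-- first-insertion order.

-- ===== PORT A =====
-- A's inner `dfs` and its `for i in allCourses - seen` loop, as mutual fuel recursion.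
-- Fuel is a totality device only: each nested dfs call decreases it by exactly 1, the
-- nesting depth is at most len(allCourses), and the port starts with len(allCourses)+1,
-- so the fuel-0 branch is never reached.  `pre[course]` truthiness is `!….isEmpty`;
-- defaultdict reads are `getD … Set.empty` (defaultdict's silent insertion of an empty
-- value on read never changes a later lookup, so values are tracked, keys are not).
mutual
def pvDfsA (ac : List Int) (isP : PySem.Dict Int (PySem.Set Int)) :
    Nat → PySem.Dict Int (PySem.Set Int) → PySem.Set (List Int) → List Int → PySem.Set Int → Int →
      PySem.Dict Int (PySem.Set Int) × PySem.Set (List Int)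
  | 0, P, res, _, _, _ => (P, res)
  | Nat.succ f, P, res, path, seen, course =>
      if path.length = ac.length then (P, PySem.Set.add res path)
      else if PySem.Set.contains seen course || !(PySem.Dict.getD P course PySem.Set.empty).isEmpty then
        (P, res)
      else
        -- mark = is_pre[course]; for i in mark: pre[i].discard(course)
        let mark : List Int := PySem.Dict.getD isP course PySem.Set.empty
        let P1 := mark.foldl (fun d i => PySem.Dict.modify d i PySem.Set.empty
          (fun s => PySem.Set.discard s course)) P
        let pr := pvLoopA ac isP f P1 res (path ++ [course]) (PySem.Set.add seen course)
          (PySem.Set.diff ac seen)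
        -- for i in mark: pre[i].add(course)
        let P3 := mark.foldl (fun d i => PySem.Dict.modify d i PySem.Set.empty
          (fun s => PySem.Set.add s course)) pr.1
        (P3, pr.2)
  termination_by f _ _ _ _ _ => (f, 0)

def pvLoopA (ac : List Int) (isP : PySem.Dict Int (PySem.Set Int)) :
    Nat → PySem.Dict Int (PySem.Set Int) → PySem.Set (List Int) → List Int → PySem.Set Int → List Int →
      PySem.Dict Int (PySem.Set Int) × PySem.Set (List Int)
  | _, P, res, _, _, [] => (P, res)
  | f, P, res, path, seen, c :: cs =>
      let pr := pvDfsA ac isP f P res path seen c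
      pvLoopA ac isP f pr.1 pr.2 path seen cs
  termination_by f _ _ _ _ cs => (f, cs.length + 1)
end

-- for i, j in coursesRelation: allCourses.add(i); allCourses.add(j);
--                              pre[i].add(j); is_pre[j].add(i)   (independent updates)
-- then: for i in allCourses: dfs([], set(), i); return res
def courseHelper (coursesRelation : List (Int × Int)) : List (List Int) :=
  let b := coursesRelation.foldl (fun st e =>
      (PySem.Set.add (PySem.Set.add st.1 e.1) e.2,
       PySem.Dict.modify st.2.1 e.1 PySem.Set.empty (fun s => PySem.Set.add s e.2),
       PySem.Dict.modify st.2.2 e.2 PySem.Set.empty (fun s => PySem.Set.add s e.1)))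
    (PySem.Set.empty, PySem.Dict.empty, PySem.Dict.empty)
  let allCourses := b.1
  let r := allCourses.foldl (fun st i =>
      pvDfsA allCourses b.2.2 (allCourses.length + 1) st.1 st.2 [] PySem.Set.empty i)
    (b.2.1, PySem.Set.empty)
  r.2

-- ===== PORT B =====
-- B's `backtrack(rest)` and its `for v in rest` loop, as mutual fuel recursion (fuel is
-- the same totality device as in port A; the fuel-0 branch is unreachable from n+1).
-- `rest` is the remaining-course frontier handed down by the caller; `cands` is the
-- frontier computed for the children (`node_set - taken`, before v is marked taken).
-- `indeg[d] -= 1` / `+= 1` act on keys that are always present (every dependent is a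
-- node), so `modify … 0` computes exactly the Python update.
mutual
def pvBtB (nodes : List Int) (dep : PySem.Dict Int (PySem.Set Int)) (n : Nat) :
    Nat → PySem.Dict Int Int → PySem.Set (List Int) → List Int → PySem.Set Int → List Int →
      PySem.Dict Int Int × PySem.Set (List Int)
  | 0, G, res, _, _, _ => (G, res)
  | Nat.succ f, G, res, path, taken, rest =>
      if path.length = n then (G, PySem.Set.add res path)
      else pvLoopB nodes dep n f G res path taken rest
  termination_by f _ _ _ _ _ => (f, 0)

def pvLoopB (nodes : List Int) (dep : PySem.Dict Int (PySem.Set Int)) (n : Nat) :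
    Nat → PySem.Dict Int Int → PySem.Set (List Int) → List Int → PySem.Set Int → List Int →
      PySem.Dict Int Int × PySem.Set (List Int)
  | _, G, res, _, _, [] => (G, res)
  | f, G, res, path, taken, v :: vs =>
      if PySem.Set.contains taken v || !(PySem.Dict.getD G v 0 == 0) then
        pvLoopB nodes dep n f G res path taken vs
      else
        let cands : List Int := PySem.Set.diff nodes taken
        let ds : List Int := PySem.Dict.getD dep v PySem.Set.empty
        let G1 := ds.foldl (fun g d => PySem.Dict.modify g d 0 (fun x => x - 1)) G
        let pr := pvBtB nodes dep n f G1 res (path ++ [v]) (PySem.Set.add taken v) cands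
        let G3 := ds.foldl (fun g d => PySem.Dict.modify g d 0 (fun x => x + 1)) pr.1
        pvLoopB nodes dep n f G3 pr.2 path taken vs
  termination_by f _ _ _ _ vs => (f, vs.length + 1)
end

-- node_set.add(i); node_set.add(j); prereqs[i].add(j); dependents[j].add(i);
-- indeg = {v: len(prereqs[v]) for v in node_set}; if node_set: backtrack(node_set)
def courseHelper_alt (coursesRelation : List (Int × Int)) : List (List Int) :=
  let b := coursesRelation.foldl (fun st e =>
      (PySem.Set.add (PySem.Set.add st.1 e.1) e.2,
       PySem.Dict.modify st.2.1 e.1 PySem.Set.empty (fun s => PySem.Set.add s e.2),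
       PySem.Dict.modify st.2.2 e.2 PySem.Set.empty (fun s => PySem.Set.add s e.1)))
    (PySem.Set.empty, PySem.Dict.empty, PySem.Dict.empty)
  let nodes := b.1
  let indeg := nodes.foldl (fun d v =>
      PySem.Dict.insert d v (PySem.Set.len (PySem.Dict.getD b.2.1 v PySem.Set.empty))) PySem.Dict.empty
  let n := nodes.length
  if nodes = [] then PySem.Set.empty
  else (pvBtB nodes b.2.2 n (n + 1) indeg PySem.Set.empty [] PySem.Set.empty nodes).2

-- ===== PRECONDITION & SPEC =====
def Spec_courseHelper (coursesRelation : List (Int × Int)) (out : List (List Int)) : Prop := out = courseHelper_alt coursesRelation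
instance (coursesRelation : List (Int × Int)) (out : List (List Int)) : Decidable (Spec_courseHelper coursesRelation out) := by unfold Spec_courseHelper; infer_instance

-- ===== CLAIM (what is proved, stated in full; the proofs are below) =====
def Claim_equal_courseHelper : Prop := ∀ (coursesRelation : List (Int × Int)), Dom_courseHelper coursesRelation → Spec_courseHelper coursesRelation (courseHelper coursesRelation)

-- ===== LEMMAS AND PROOFS =====

-- The three data structures both ports build from the edge list, as separate folds.
def pvAC (rel : List (Int × Int)) : PySem.Set Int :=
  rel.foldl (fun s e => PySem.Set.add (PySem.Set.add s e.1) e.2) PySem.Set.empty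
def pvPRE (rel : List (Int × Int)) : PySem.Dict Int (PySem.Set Int) :=
  rel.foldl (fun d e => PySem.Dict.modify d e.1 PySem.Set.empty (fun s => PySem.Set.add s e.2)) PySem.Dict.empty
def pvDEP (rel : List (Int × Int)) : PySem.Dict Int (PySem.Set Int) :=
  rel.foldl (fun d e => PySem.Dict.modify d e.2 PySem.Set.empty (fun s => PySem.Set.add s e.1)) PySem.Dict.empty

lemma pvBuild_split (rel : List (Int × Int)) :
    ∀ (a : PySem.Set Int) (p q : PySem.Dict Int (PySem.Set Int)),
    rel.foldl (fun st e =>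
      (PySem.Set.add (PySem.Set.add st.1 e.1) e.2,
       PySem.Dict.modify st.2.1 e.1 PySem.Set.empty (fun s => PySem.Set.add s e.2),
       PySem.Dict.modify st.2.2 e.2 PySem.Set.empty (fun s => PySem.Set.add s e.1))) (a, p, q)
    = (rel.foldl (fun s e => PySem.Set.add (PySem.Set.add s e.1) e.2) a,
       rel.foldl (fun d e => PySem.Dict.modify d e.1 PySem.Set.empty (fun s => PySem.Set.add s e.2)) p,
       rel.foldl (fun d e => PySem.Dict.modify d e.2 PySem.Set.empty (fun s => PySem.Set.add s e.1)) q) := by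
  induction rel with
  | nil => intro a p q; rfl
  | cons e rel ih => intro a p q; simpa using ih _ _ _

-- remaining-prerequisite count of c after the courses in `path` are taken
def pvRem (rel : List (Int × Int)) (path : List Int) (c : Int) : Nat :=
  (((pvPRE rel).getD c PySem.Set.empty).filter (fun x => decide (x ∉ path))).length

-- the list of complete orderings produced from a given state, A's recursion shape
def pvGenD (rel : List (Int × Int)) : Nat → List Int → Int → List (List Int)
  | 0, _, _ => []
  | Nat.succ f, path, c =>
      if path.length = (pvAC rel).length then [path]
      else if c ∈ path ∨ pvRem rel path c ≠ 0 then []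
      else ((pvAC rel).filter (fun x => decide (x ∉ path))).flatMap
        (fun i => pvGenD rel f (path ++ [c]) i)

-- the list of complete orderings produced from a given state, B's recursion shape
-- (`rest` is the frontier list handed down by the caller)
def pvGenB (rel : List (Int × Int)) : Nat → List Int → List Int → List (List Int)
  | 0, _, _ => []
  | Nat.succ f, path, rest =>
      if path.length = (pvAC rel).length then [path]
      else rest.flatMap
        (fun v => if v ∈ path ∨ pvRem rel path v ≠ 0 then []
          else pvGenB rel f (path ++ [v]) ((pvAC rel).filter (fun x => decide (x ∉ path))))

def pvAddAll (res : PySem.Set (List Int)) (L : List (List Int)) : PySem.Set (List Int) :=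
  L.foldl PySem.Set.add res

def pvInvA (rel : List (Int × Int)) (P : PySem.Dict Int (PySem.Set Int)) (path : List Int) : Prop :=
  ∀ c x, x ∈ P.getD c PySem.Set.empty ↔ x ∈ (pvPRE rel).getD c PySem.Set.empty ∧ x ∉ path

def pvInvB (rel : List (Int × Int)) (G : PySem.Dict Int Int) (path : List Int) : Prop :=
  ∀ c, G.getD c 0 = (pvRem rel path c : Int)

def pvSeenOK (seen : PySem.Set Int) (path : List Int) : Prop :=
  ∀ x, PySem.Set.contains seen x = true ↔ x ∈ path

-- membership / nodup characterisations of the built structures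
lemma pvAC_mem_aux (rel : List (Int × Int)) :
    ∀ (s : PySem.Set Int) (x : Int),
      x ∈ rel.foldl (fun s e => PySem.Set.add (PySem.Set.add s e.1) e.2) s
        ↔ x ∈ s ∨ ∃ e ∈ rel, x = e.1 ∨ x = e.2 := by
  induction rel with
  | nil => simp
  | cons e rel ih =>
    intro s x
    simp only [List.foldl_cons]
    rw [ih]
    simp [PySem.Set.mem_add]
    constructor
    · rintro ((h|h)|h)
      · tauto
      · tauto
      · exact Or.inr (Or.inr h)
    · rintro (h|(h|h)|h)
      · tauto
      · tauto
      · tauto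
      · exact Or.inr h

lemma pvAC_nodup_aux (rel : List (Int × Int)) :
    ∀ (s : PySem.Set Int), s.Nodup →
      (rel.foldl (fun s e => PySem.Set.add (PySem.Set.add s e.1) e.2) s).Nodup := by
  induction rel with
  | nil => intro s hs; simpa using hs
  | cons e rel ih =>
    intro s hs
    exact ih _ (PySem.Set.nodup_add _ _ (PySem.Set.nodup_add _ _ hs))

lemma mem_pvAC (rel : List (Int × Int)) (x : Int) :
    x ∈ pvAC rel ↔ ∃ e ∈ rel, x = e.1 ∨ x = e.2 := by
  simpa using pvAC_mem_aux rel PySem.Set.empty x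

lemma nodup_pvAC (rel : List (Int × Int)) : (pvAC rel).Nodup :=
  pvAC_nodup_aux rel PySem.Set.empty List.nodup_nil

lemma mem_pvPRE_aux (rel : List (Int × Int)) :
    ∀ (d : PySem.Dict Int (PySem.Set Int)) (c x : Int),
      x ∈ (rel.foldl (fun d e => PySem.Dict.modify d e.1 PySem.Set.empty (fun s => PySem.Set.add s e.2)) d).getD c PySem.Set.empty
        ↔ x ∈ d.getD c PySem.Set.empty ∨ (c, x) ∈ rel := by
  induction rel with
  | nil => simp
  | cons e rel ih =>
    intro d c x
    simp only [List.foldl_cons]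
    rw [ih, PySem.Dict.getD_modify]
    by_cases h : c = e.1 <;>
      simp [h, PySem.Set.mem_add, Prod.ext_iff] <;> tauto

lemma nodup_pvPRE_aux (rel : List (Int × Int)) :
    ∀ (d : PySem.Dict Int (PySem.Set Int)), (∀ c, (d.getD c PySem.Set.empty).Nodup) →
      ∀ c, ((rel.foldl (fun d e => PySem.Dict.modify d e.1 PySem.Set.empty (fun s => PySem.Set.add s e.2)) d).getD c PySem.Set.empty).Nodup := by
  induction rel with
  | nil => intro d h c; simpa using h c
  | cons e rel ih =>
    intro d h c
    refine ih _ ?_ c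
    intro c'
    rw [PySem.Dict.getD_modify]
    split
    · exact PySem.Set.nodup_add _ _ (h _)
    · exact h _

lemma mem_pvPRE (rel : List (Int × Int)) (c x : Int) :
    x ∈ (pvPRE rel).getD c PySem.Set.empty ↔ (c, x) ∈ rel := by
  simpa [PySem.Dict.getD_empty] using mem_pvPRE_aux rel PySem.Dict.empty c x

lemma nodup_pvPRE (rel : List (Int × Int)) (c : Int) : ((pvPRE rel).getD c PySem.Set.empty).Nodup := by
  exact nodup_pvPRE_aux rel PySem.Dict.empty (by intro c; simp [PySem.Dict.getD_empty]) c

lemma mem_pvDEP_aux (rel : List (Int × Int)) :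
    ∀ (d : PySem.Dict Int (PySem.Set Int)) (c x : Int),
      x ∈ (rel.foldl (fun d e => PySem.Dict.modify d e.2 PySem.Set.empty (fun s => PySem.Set.add s e.1)) d).getD c PySem.Set.empty
        ↔ x ∈ d.getD c PySem.Set.empty ∨ (x, c) ∈ rel := by
  induction rel with
  | nil => simp
  | cons e rel ih =>
    intro d c x
    simp only [List.foldl_cons]
    rw [ih, PySem.Dict.getD_modify]
    by_cases h : c = e.2 <;>
      simp [h, PySem.Set.mem_add, Prod.ext_iff] <;> tauto

lemma nodup_pvDEP_aux (rel : List (Int × Int)) :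
    ∀ (d : PySem.Dict Int (PySem.Set Int)), (∀ c, (d.getD c PySem.Set.empty).Nodup) →
      ∀ c, ((rel.foldl (fun d e => PySem.Dict.modify d e.2 PySem.Set.empty (fun s => PySem.Set.add s e.1)) d).getD c PySem.Set.empty).Nodup := by
  induction rel with
  | nil => intro d h c; simpa using h c
  | cons e rel ih =>
    intro d h c
    refine ih _ ?_ c
    intro c'
    rw [PySem.Dict.getD_modify]
    split
    · exact PySem.Set.nodup_add _ _ (h _)
    · exact h _

lemma mem_pvDEP (rel : List (Int × Int)) (c x : Int) :
    x ∈ (pvDEP rel).getD c PySem.Set.empty ↔ (x, c) ∈ rel := by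
  simpa [PySem.Dict.getD_empty] using mem_pvDEP_aux rel PySem.Dict.empty c x

lemma nodup_pvDEP (rel : List (Int × Int)) (c : Int) : ((pvDEP rel).getD c PySem.Set.empty).Nodup := by
  exact nodup_pvDEP_aux rel PySem.Dict.empty (by intro c; simp [PySem.Dict.getD_empty]) c

lemma mem_pvDEP_iff_pvPRE (rel : List (Int × Int)) (v x : Int) :
    x ∈ (pvDEP rel).getD v PySem.Set.empty ↔ v ∈ (pvPRE rel).getD x PySem.Set.empty := by
  rw [mem_pvDEP, mem_pvPRE]

lemma pvPRE_mem_ac (rel : List (Int × Int)) (c x : Int)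
    (h : x ∈ (pvPRE rel).getD c PySem.Set.empty) : c ∈ pvAC rel := by
  rw [mem_pvPRE] at h
  exact (mem_pvAC rel c).2 ⟨(c, x), h, Or.inl rfl⟩

lemma pvPRE_empty_of_not_ac (rel : List (Int × Int)) (c : Int) (h : c ∉ pvAC rel) :
    (pvPRE rel).getD c PySem.Set.empty = [] := by
  rw [List.eq_nil_iff_forall_not_mem]
  intro x hx
  exact h (pvPRE_mem_ac rel c x hx)

-- generic dictionary-fold characterisations
lemma getD_foldl_modify_nodup {ν : Type} (L : List Int) (hL : L.Nodup)
    (d : PySem.Dict Int ν) (d0 : ν) (f : ν → ν) (x : Int) :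
    (L.foldl (fun d i => PySem.Dict.modify d i d0 f) d).getD x d0
      = if x ∈ L then f (d.getD x d0) else d.getD x d0 := by
  induction L generalizing d with
  | nil => simp
  | cons a L ih =>
    simp only [List.foldl_cons]
    rcases List.nodup_cons.1 hL with ⟨ha, hL'⟩
    rw [ih hL']
    by_cases hx : x = a
    · subst hx
      simp [ha]
    · by_cases hxL : x ∈ L <;> simp [hx, hxL, PySem.Dict.getD_modify]

lemma getD_foldl_insert {ν : Type} (l : List Int) (f : Int → ν) (d : PySem.Dict Int ν)
    (d0 : ν) (c : Int) :
    (l.foldl (fun d v => PySem.Dict.insert d v (f v)) d).getD c d0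
      = if c ∈ l then f c else d.getD c d0 := by
  induction l generalizing d with
  | nil => simp
  | cons a l ih =>
    simp only [List.foldl_cons]
    rw [ih]
    by_cases hc : c ∈ l
    · simp [hc]
    · by_cases hca : c = a <;> simp [hc, hca, PySem.Dict.getD_insert]

-- list lemmas about filters used by the pure argument
lemma pvLen_filter_append (l path : List Int) (v : Int) (hl : l.Nodup) (hv : v ∉ path) :
    (l.filter (fun x => decide (x ∉ path ++ [v]))).length + (if v ∈ l then 1 else 0)
      = (l.filter (fun x => decide (x ∉ path))).length := by
  induction l with
  | nil => simp
  | cons a l ih =>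
    rcases List.nodup_cons.1 hl with ⟨ha, hl'⟩
    have ih' := ih hl'
    simp only [List.filter_cons]
    by_cases hav : a = v
    · subst hav
      have e1 : decide (a ∉ path ++ [a]) = false := by simp
      have e2 : decide (a ∉ path) = true := by simpa using hv
      rw [if_neg ha] at ih'
      rw [e1, e2, if_pos (show a ∈ a :: l from List.mem_cons_self)]
      simp only [Bool.false_eq_true, if_false, if_true, List.length_cons]
      omega
    · have e1 : decide (a ∉ path ++ [v]) = decide (a ∉ path) := by simp [hav]
      rw [e1]
      by_cases hvl : v ∈ l
      · rw [if_pos hvl] at ih'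
        rw [if_pos (show v ∈ a :: l from List.mem_cons_of_mem a hvl)]
        by_cases hp : decide (a ∉ path) = true
        · rw [if_pos hp, if_pos hp, List.length_cons, List.length_cons]; omega
        · rw [if_neg hp, if_neg hp]; omega
      · rw [if_neg hvl] at ih'
        rw [if_neg (show v ∉ a :: l by simp [Ne.symm hav, hvl, List.mem_cons])]
        by_cases hp : decide (a ∉ path) = true
        · rw [if_pos hp, if_pos hp, List.length_cons, List.length_cons]; omega
        · rw [if_neg hp, if_neg hp]; omega

lemma pvLen_filter_complement (ac path : List Int) (h1 : ac.Nodup) (h2 : path.Nodup)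
    (h3 : ∀ x ∈ path, x ∈ ac) :
    (ac.filter (fun x => decide (x ∉ path))).length + path.length = ac.length := by
  have hperm : (ac.filter (fun x => decide (x ∈ path))).Perm path := by
    rw [List.perm_ext_iff_of_nodup (List.Nodup.filter _ h1) h2]
    intro a
    simp only [List.mem_filter, decide_eq_true_eq]
    exact ⟨fun h => h.2, fun h => ⟨h3 a h, h⟩⟩
  have hlen := hperm.length_eq
  have e : (fun x : Int => decide (x ∉ path)) = (fun x => !decide (x ∈ path)) := by
    funext x; simp [decide_not]
  rw [e]
  have := List.length_eq_length_filter_add (l := ac) (fun x => decide (x ∈ path))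
  omega

-- pvRem facts
lemma pvRem_append (rel : List (Int × Int)) (path : List Int) (v c : Int) (hv : v ∉ path) :
    pvRem rel (path ++ [v]) c + (if v ∈ (pvPRE rel).getD c PySem.Set.empty then 1 else 0)
      = pvRem rel path c :=
  pvLen_filter_append _ path v (nodup_pvPRE rel c) hv

lemma pvRem_zero_iff (rel : List (Int × Int)) (path : List Int) (c : Int) :
    pvRem rel path c = 0 ↔ ∀ x ∈ (pvPRE rel).getD c PySem.Set.empty, x ∈ path := by
  unfold pvRem
  rw [List.length_eq_zero_iff, List.filter_eq_nil_iff]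
  simp

-- invariant transitions
lemma pvSeenOK_add (seen : PySem.Set Int) (path : List Int) (c : Int)
    (hs : pvSeenOK seen path) : pvSeenOK (PySem.Set.add seen c) (path ++ [c]) := by
  intro x
  rw [PySem.Set.contains_iff, PySem.Set.mem_add, List.mem_append, List.mem_singleton,
    ← PySem.Set.contains_iff, hs x]

lemma pvInvA_discard (rel : List (Int × Int)) (P : PySem.Dict Int (PySem.Set Int))
    (path : List Int) (c : Int) (hP : pvInvA rel P path) (hcp : c ∉ path) :
    pvInvA rel (((pvDEP rel).getD c PySem.Set.empty).foldl
      (fun d i => PySem.Dict.modify d i PySem.Set.empty (fun s => PySem.Set.discard s c)) P)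
      (path ++ [c]) := by
  intro c' x
  rw [getD_foldl_modify_nodup _ (nodup_pvDEP rel c)]
  by_cases hm : c' ∈ (pvDEP rel).getD c PySem.Set.empty
  · rw [if_pos hm, PySem.Set.mem_discard, hP c' x, List.mem_append, List.mem_singleton]
    tauto
  · rw [if_neg hm, hP c' x, List.mem_append, List.mem_singleton]
    have hnp : c ∉ (pvPRE rel).getD c' PySem.Set.empty :=
      fun h => hm ((mem_pvDEP_iff_pvPRE rel c c').2 h)
    constructor
    · rintro ⟨h1, h2⟩
      refine ⟨h1, ?_⟩
      rintro (h | rfl)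
      · exact h2 h
      · exact hnp h1
    · rintro ⟨h1, h2⟩
      exact ⟨h1, fun h => h2 (Or.inl h)⟩

lemma pvInvA_addback (rel : List (Int × Int)) (P : PySem.Dict Int (PySem.Set Int))
    (path : List Int) (c : Int) (hP : pvInvA rel P (path ++ [c])) (hcp : c ∉ path) :
    pvInvA rel (((pvDEP rel).getD c PySem.Set.empty).foldl
      (fun d i => PySem.Dict.modify d i PySem.Set.empty (fun s => PySem.Set.add s c)) P)
      path := by
  intro c' x
  rw [getD_foldl_modify_nodup _ (nodup_pvDEP rel c)]
  by_cases hm : c' ∈ (pvDEP rel).getD c PySem.Set.empty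
  · rw [if_pos hm, PySem.Set.mem_add, hP c' x, List.mem_append, List.mem_singleton]
    have hpre : c ∈ (pvPRE rel).getD c' PySem.Set.empty :=
      (mem_pvDEP_iff_pvPRE rel c c').1 hm
    constructor
    · rintro (⟨h1, h2⟩ | rfl)
      · exact ⟨h1, fun h => h2 (Or.inl h)⟩
      · exact ⟨hpre, hcp⟩
    · rintro ⟨h1, h2⟩
      by_cases hxc : x = c
      · exact Or.inr hxc
      · exact Or.inl ⟨h1, by tauto⟩
  · rw [if_neg hm, hP c' x, List.mem_append, List.mem_singleton]
    have hnp : c ∉ (pvPRE rel).getD c' PySem.Set.empty :=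
      fun h => hm ((mem_pvDEP_iff_pvPRE rel c c').2 h)
    constructor
    · rintro ⟨h1, h2⟩
      exact ⟨h1, fun h => h2 (Or.inl h)⟩
    · rintro ⟨h1, h2⟩
      refine ⟨h1, ?_⟩
      rintro (h | rfl)
      · exact h2 h
      · exact hnp h1

lemma pvInvB_dec (rel : List (Int × Int)) (G : PySem.Dict Int Int)
    (path : List Int) (v : Int) (hG : pvInvB rel G path) (hv : v ∉ path) :
    pvInvB rel (((pvDEP rel).getD v PySem.Set.empty).foldl
      (fun g d => PySem.Dict.modify g d 0 (fun x => x - 1)) G) (path ++ [v]) := by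
  intro x
  rw [getD_foldl_modify_nodup _ (nodup_pvDEP rel v)]
  have key := pvRem_append rel path v x hv
  by_cases hm : x ∈ (pvDEP rel).getD v PySem.Set.empty
  · have hpre : v ∈ (pvPRE rel).getD x PySem.Set.empty := (mem_pvDEP_iff_pvPRE rel v x).1 hm
    rw [if_pos hm, hG x, if_pos hpre] at *
    omega
  · have hnp : v ∉ (pvPRE rel).getD x PySem.Set.empty :=
      fun h => hm ((mem_pvDEP_iff_pvPRE rel v x).2 h)
    rw [if_neg hm, hG x, if_neg hnp] at *
    omega

lemma pvInvB_inc (rel : List (Int × Int)) (G : PySem.Dict Int Int)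
    (path : List Int) (v : Int) (hG : pvInvB rel G (path ++ [v])) (hv : v ∉ path) :
    pvInvB rel (((pvDEP rel).getD v PySem.Set.empty).foldl
      (fun g d => PySem.Dict.modify g d 0 (fun x => x + 1)) G) path := by
  intro x
  rw [getD_foldl_modify_nodup _ (nodup_pvDEP rel v)]
  have key := pvRem_append rel path v x hv
  by_cases hm : x ∈ (pvDEP rel).getD v PySem.Set.empty
  · have hpre : v ∈ (pvPRE rel).getD x PySem.Set.empty := (mem_pvDEP_iff_pvPRE rel v x).1 hm
    rw [if_pos hm, hG x, if_pos hpre] at *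
    omega
  · have hnp : v ∉ (pvPRE rel).getD x PySem.Set.empty :=
      fun h => hm ((mem_pvDEP_iff_pvPRE rel v x).2 h)
    rw [if_neg hm, hG x, if_neg hnp] at *
    omega

lemma pvEmpty_iff (rel : List (Int × Int)) (P : PySem.Dict Int (PySem.Set Int))
    (path : List Int) (c : Int) (hP : pvInvA rel P path) :
    (PySem.Dict.getD P c PySem.Set.empty).isEmpty = true ↔ pvRem rel path c = 0 := by
  rw [List.isEmpty_iff, pvRem_zero_iff]
  constructor
  · intro he x hx
    by_contra hxp
    have : x ∈ PySem.Dict.getD P c PySem.Set.empty := (hP c x).2 ⟨hx, hxp⟩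
    rw [he] at this
    exact absurd this (List.not_mem_nil)
  · intro hall
    rw [List.eq_nil_iff_forall_not_mem]
    intro x hx
    obtain ⟨h1, h2⟩ := (hP c x).1 hx
    exact h2 (hall x h1)

lemma pvDiff_eq (rel : List (Int × Int)) (seen : PySem.Set Int) (path : List Int)
    (hs : pvSeenOK seen path) :
    PySem.Set.diff (pvAC rel) seen = (pvAC rel).filter (fun x => decide (x ∉ path)) := by
  apply List.filter_congr
  intro x _
  have h := hs x
  cases hcx : PySem.Set.contains seen x
  · rw [hcx] at h
    simp only [Bool.not_false]
    symm
    rw [decide_eq_true_eq]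
    intro hxp
    exact absurd (h.2 hxp) (by simp)
  · rw [hcx] at h
    simp only [Bool.not_true]
    symm
    rw [decide_eq_false_iff_not, not_not]
    exact h.1 rfl

-- ===== the two simulation lemmas =====
lemma pvDfsA_spec (rel : List (Int × Int)) :
    ∀ f : Nat, ∀ (P : PySem.Dict Int (PySem.Set Int)) (res : PySem.Set (List Int))
      (path : List Int) (seen : PySem.Set Int) (c : Int),
      pvInvA rel P path → pvSeenOK seen path →
      (pvDfsA (pvAC rel) (pvDEP rel) f P res path seen c).2 = pvAddAll res (pvGenD rel f path c)
      ∧ pvInvA rel (pvDfsA (pvAC rel) (pvDEP rel) f P res path seen c).1 path := by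
  intro f
  induction f with
  | zero =>
    intro P res path seen c hP _
    exact ⟨by simp [pvDfsA, pvGenD, pvAddAll], by simpa [pvDfsA] using hP⟩
  | succ f ih =>
    have hloop : ∀ (cs : List Int) (P : PySem.Dict Int (PySem.Set Int))
        (res : PySem.Set (List Int)) (path : List Int) (seen : PySem.Set Int),
        pvInvA rel P path → pvSeenOK seen path →
        (pvLoopA (pvAC rel) (pvDEP rel) f P res path seen cs).2
          = pvAddAll res (cs.flatMap (pvGenD rel f path ·))
        ∧ pvInvA rel (pvLoopA (pvAC rel) (pvDEP rel) f P res path seen cs).1 path := by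
      intro cs
      induction cs with
      | nil =>
        intro P res path seen hP _
        exact ⟨by simp [pvLoopA, pvAddAll], by simpa [pvLoopA] using hP⟩
      | cons a cs ihc =>
        intro P res path seen hP hs
        obtain ⟨h2, h1⟩ := ih P res path seen a hP hs
        obtain ⟨g2, g1⟩ := ihc (pvDfsA (pvAC rel) (pvDEP rel) f P res path seen a).1
          (pvDfsA (pvAC rel) (pvDEP rel) f P res path seen a).2 path seen h1 hs
        constructor
        · simp only [pvLoopA]
          rw [g2, h2]
          simp [pvAddAll, List.foldl_append]
        · simp only [pvLoopA]
          exact g1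
    intro P res path seen c hP hs
    by_cases hlen : path.length = (pvAC rel).length
    · constructor
      · simp only [pvDfsA]
        rw [if_pos hlen]
        simp only [pvGenD]
        rw [if_pos hlen]
        simp [pvAddAll]
      · simp only [pvDfsA]
        rw [if_pos hlen]
        exact hP
    · have hbool : (PySem.Set.contains seen c
          || !(PySem.Dict.getD P c PySem.Set.empty).isEmpty) = true
          ↔ (c ∈ path ∨ pvRem rel path c ≠ 0) := by
        rw [Bool.or_eq_true, Bool.not_eq_true', Bool.eq_false_iff]
        rw [hs c]
        have := pvEmpty_iff rel P path c hP
        constructor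
        · rintro (h | h)
          · exact Or.inl h
          · exact Or.inr (fun h0 => h (this.2 h0))
        · rintro (h | h)
          · exact Or.inl h
          · exact Or.inr (fun ht => h (this.1 ht))
      by_cases hcnd : c ∈ path ∨ pvRem rel path c ≠ 0
      · have hb : (PySem.Set.contains seen c
            || !(PySem.Dict.getD P c PySem.Set.empty).isEmpty) = true := hbool.2 hcnd
        constructor
        · simp only [pvDfsA]
          rw [if_neg hlen, if_pos hb]
          simp only [pvGenD]
          rw [if_neg hlen, if_pos hcnd]
          simp [pvAddAll]
        · simp only [pvDfsA]
          rw [if_neg hlen, if_pos hb]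
          exact hP
      · have hb : ¬ ((PySem.Set.contains seen c
            || !(PySem.Dict.getD P c PySem.Set.empty).isEmpty) = true) :=
          fun h => hcnd (hbool.1 h)
        have hcp : c ∉ path := fun h => hcnd (Or.inl h)
        have hP1 := pvInvA_discard rel P path c hP hcp
        have hs' := pvSeenOK_add seen path c hs
        obtain ⟨hl2, hl1⟩ := hloop (PySem.Set.diff (pvAC rel) seen)
          (((pvDEP rel).getD c PySem.Set.empty).foldl
            (fun d i => PySem.Dict.modify d i PySem.Set.empty
              (fun s => PySem.Set.discard s c)) P)
          res (path ++ [c]) (PySem.Set.add seen c) hP1 hs'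
        have hstep : pvDfsA (pvAC rel) (pvDEP rel) (f + 1) P res path seen c
            = (((pvDEP rel).getD c PySem.Set.empty).foldl
                (fun d i => PySem.Dict.modify d i PySem.Set.empty
                  (fun s => PySem.Set.add s c))
                (pvLoopA (pvAC rel) (pvDEP rel) f
                  (((pvDEP rel).getD c PySem.Set.empty).foldl
                    (fun d i => PySem.Dict.modify d i PySem.Set.empty
                      (fun s => PySem.Set.discard s c)) P)
                  res (path ++ [c]) (PySem.Set.add seen c)
                  (PySem.Set.diff (pvAC rel) seen)).1,
               (pvLoopA (pvAC rel) (pvDEP rel) f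
                  (((pvDEP rel).getD c PySem.Set.empty).foldl
                    (fun d i => PySem.Dict.modify d i PySem.Set.empty
                      (fun s => PySem.Set.discard s c)) P)
                  res (path ++ [c]) (PySem.Set.add seen c)
                  (PySem.Set.diff (pvAC rel) seen)).2) := by
          simp only [pvDfsA]
          rw [if_neg hlen, if_neg hb]
        constructor
        · rw [hstep]
          show (pvLoopA (pvAC rel) (pvDEP rel) f _ res (path ++ [c]) (PySem.Set.add seen c)
              (PySem.Set.diff (pvAC rel) seen)).2 = _
          rw [hl2]
          simp only [pvGenD]
          rw [if_neg hlen, if_neg hcnd, pvDiff_eq rel seen path hs]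
        · rw [hstep]
          exact pvInvA_addback rel _ path c hl1 hcp

lemma pvBtB_spec (rel : List (Int × Int)) :
    ∀ f : Nat, ∀ (G : PySem.Dict Int Int) (res : PySem.Set (List Int))
      (path : List Int) (taken : PySem.Set Int) (rest : List Int),
      pvInvB rel G path → pvSeenOK taken path →
      (pvBtB (pvAC rel) (pvDEP rel) (pvAC rel).length f G res path taken rest).2
        = pvAddAll res (pvGenB rel f path rest)
      ∧ pvInvB rel
          (pvBtB (pvAC rel) (pvDEP rel) (pvAC rel).length f G res path taken rest).1 path := by
  intro f
  induction f with
  | zero =>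
    intro G res path taken rest hG _
    exact ⟨by simp [pvBtB, pvGenB, pvAddAll], by simpa [pvBtB] using hG⟩
  | succ f ih =>
    have hloop : ∀ (vs : List Int) (G : PySem.Dict Int Int) (res : PySem.Set (List Int))
        (path : List Int) (taken : PySem.Set Int),
        pvInvB rel G path → pvSeenOK taken path →
        (pvLoopB (pvAC rel) (pvDEP rel) (pvAC rel).length f G res path taken vs).2
          = pvAddAll res (vs.flatMap
              (fun v => if v ∈ path ∨ pvRem rel path v ≠ 0 then []
                else pvGenB rel f (path ++ [v])
                  ((pvAC rel).filter (fun x => decide (x ∉ path)))))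
        ∧ pvInvB rel
            (pvLoopB (pvAC rel) (pvDEP rel) (pvAC rel).length f G res path taken vs).1 path := by
      intro vs
      induction vs with
      | nil =>
        intro G res path taken hG _
        exact ⟨by simp [pvLoopB, pvAddAll], by simpa [pvLoopB] using hG⟩
      | cons v vs ihv =>
        intro G res path taken hG hs
        have hbool : (PySem.Set.contains taken v || !(PySem.Dict.getD G v 0 == 0)) = true
            ↔ (v ∈ path ∨ pvRem rel path v ≠ 0) := by
          rw [Bool.or_eq_true, Bool.not_eq_true', Bool.eq_false_iff]
          rw [hs v, hG v]
          constructor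
          · rintro (h | h)
            · exact Or.inl h
            · refine Or.inr (fun h0 => h ?_)
              rw [beq_iff_eq, h0]
              rfl
          · rintro (h | h)
            · exact Or.inl h
            · refine Or.inr (fun ht => h ?_)
              rw [beq_iff_eq] at ht
              exact_mod_cast ht
        by_cases hcnd : v ∈ path ∨ pvRem rel path v ≠ 0
        · have hb := hbool.2 hcnd
          obtain ⟨g2, g1⟩ := ihv G res path taken hG hs
          constructor
          · simp only [pvLoopB]
            rw [if_pos hb, g2]
            simp only [List.flatMap_cons, if_pos hcnd, List.nil_append]
          · simp only [pvLoopB]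
            rw [if_pos hb]
            exact g1
        · have hb : ¬ ((PySem.Set.contains taken v || !(PySem.Dict.getD G v 0 == 0)) = true) :=
            fun h => hcnd (hbool.1 h)
          have hvp : v ∉ path := fun h => hcnd (Or.inl h)
          have hG1 := pvInvB_dec rel G path v hG hvp
          have hs' := pvSeenOK_add taken path v hs
          obtain ⟨b2, b1⟩ := ih (((pvDEP rel).getD v PySem.Set.empty).foldl
              (fun g d => PySem.Dict.modify g d 0 (fun x => x - 1)) G)
            res (path ++ [v]) (PySem.Set.add taken v) (PySem.Set.diff (pvAC rel) taken) hG1 hs'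
          have hG3 := pvInvB_inc rel
            (pvBtB (pvAC rel) (pvDEP rel) (pvAC rel).length f
              (((pvDEP rel).getD v PySem.Set.empty).foldl
                (fun g d => PySem.Dict.modify g d 0 (fun x => x - 1)) G)
              res (path ++ [v]) (PySem.Set.add taken v) (PySem.Set.diff (pvAC rel) taken)).1
            path v b1 hvp
          obtain ⟨g2, g1⟩ := ihv (((pvDEP rel).getD v PySem.Set.empty).foldl
              (fun g d => PySem.Dict.modify g d 0 (fun x => x + 1))
              (pvBtB (pvAC rel) (pvDEP rel) (pvAC rel).length f
                (((pvDEP rel).getD v PySem.Set.empty).foldl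
                  (fun g d => PySem.Dict.modify g d 0 (fun x => x - 1)) G)
                res (path ++ [v]) (PySem.Set.add taken v) (PySem.Set.diff (pvAC rel) taken)).1)
            (pvBtB (pvAC rel) (pvDEP rel) (pvAC rel).length f
              (((pvDEP rel).getD v PySem.Set.empty).foldl
                (fun g d => PySem.Dict.modify g d 0 (fun x => x - 1)) G)
              res (path ++ [v]) (PySem.Set.add taken v) (PySem.Set.diff (pvAC rel) taken)).2
            path taken hG3 hs
          constructor
          · simp only [pvLoopB]
            rw [if_neg hb, g2, b2]
            rw [pvDiff_eq rel taken path hs]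
            simp only [List.flatMap_cons, if_neg hcnd, pvAddAll, List.foldl_append]
          · simp only [pvLoopB]
            rw [if_neg hb]
            exact g1
    intro G res path taken rest hG hs
    by_cases hlen : path.length = (pvAC rel).length
    · constructor
      · simp only [pvBtB]
        rw [if_pos hlen]
        simp only [pvGenB]
        rw [if_pos hlen]
        simp [pvAddAll]
      · simp only [pvBtB]
        rw [if_pos hlen]
        exact hG
    · obtain ⟨g2, g1⟩ := hloop rest G res path taken hG hs
      constructor
      · simp only [pvBtB]
        rw [if_neg hlen, g2]
        simp only [pvGenB]
        rw [if_neg hlen]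
      · simp only [pvBtB]
        rw [if_neg hlen]
        exact g1

-- ===== the pure argument: the two recursion shapes generate the same list =====
lemma pvGen_agree (rel : List (Int × Int)) :
    ∀ f : Nat, ∀ (path : List Int) (c : Int), path.Nodup → (∀ x ∈ path, x ∈ pvAC rel) →
      c ∈ pvAC rel → c ∉ path → path.length < (pvAC rel).length →
      (pvAC rel).length - path.length < f + 1 →
      pvGenD rel (f + 1) path c
        = if pvRem rel path c ≠ 0 then []
          else pvGenB rel f (path ++ [c]) ((pvAC rel).filter (fun x => decide (x ∉ path))) := by
  intro f
  induction f with
  | zero => intro path c _ _ _ _ hlt hfuel; omega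
  | succ f ih =>
    intro path c hnd hsub hc hcp hlt hfuel
    have hlen : path.length ≠ (pvAC rel).length := by omega
    conv_lhs => rw [pvGenD]
    rw [if_neg hlen]
    by_cases hrem : pvRem rel path c ≠ 0
    · have hcond : (c ∈ path ∨ pvRem rel path c ≠ 0) := Or.inr hrem
      rw [if_pos hcond, if_pos hrem]
    · have hcond : ¬ (c ∈ path ∨ pvRem rel path c ≠ 0) := by
        rintro (h | h)
        · exact hcp h
        · exact hrem h
      rw [if_neg hcond, if_neg hrem]
      have hnd' : (path ++ [c]).Nodup := by
        rw [← List.concat_eq_append]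
        exact List.Nodup.concat hcp hnd
      have hsub' : ∀ x ∈ path ++ [c], x ∈ pvAC rel := by
        intro x hx
        rcases List.mem_append.1 hx with h | h
        · exact hsub x h
        · rw [List.mem_singleton] at h; subst h; exact hc
      have hplen : (path ++ [c]).length = path.length + 1 := by simp
      by_cases hfull : path.length + 1 = (pvAC rel).length
      · -- the next level is complete: the candidate list is exactly [c]
        have hflen : ((pvAC rel).filter (fun x => decide (x ∉ path))).length = 1 := by
          have := pvLen_filter_complement (pvAC rel) path (nodup_pvAC rel) hnd hsub
          omega
        have hcmem : c ∈ (pvAC rel).filter (fun x => decide (x ∉ path)) := by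
          simp [List.mem_filter, hc, hcp]
        obtain ⟨a, hae⟩ := List.length_eq_one_iff.1 hflen
        rw [hae] at hcmem
        rw [List.mem_singleton] at hcmem
        subst hcmem
        rw [hae]
        have hlen' : (path ++ [c]).length = (pvAC rel).length := by rw [hplen]; omega
        simp only [List.flatMap_cons, List.flatMap_nil, List.append_nil]
        conv_lhs => rw [pvGenD]
        conv_rhs => rw [pvGenB]
        rw [if_pos hlen', if_pos hlen']
      · -- the next level is incomplete: both sides loop over the same frontier list
        have hlen' : (path ++ [c]).length ≠ (pvAC rel).length := by rw [hplen]; omega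
        conv_rhs => rw [pvGenB]
        rw [if_neg hlen']
        refine List.flatMap_congr ?_
        intro v hv
        rw [List.mem_filter] at hv
        obtain ⟨hvac, hvp⟩ := hv
        have hvp : v ∉ path := by simpa using hvp
        by_cases hvc : v = c
        · subst hvc
          have hmem : v ∈ path ++ [v] := List.mem_append.2 (Or.inr (List.mem_singleton.2 rfl))
          rw [if_pos (Or.inl hmem)]
          conv_lhs => rw [pvGenD]
          rw [if_neg hlen', if_pos (Or.inl hmem)]
        · have hvp' : v ∉ path ++ [c] := by
            simp [List.mem_append, hvp, hvc]
          have hih := ih (path ++ [c]) v hnd' hsub' hvac hvp'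
            (by omega) (by rw [hplen]; omega)
          rw [hih]
          by_cases hr : pvRem rel (path ++ [c]) v ≠ 0
          · rw [if_pos hr, if_pos (Or.inr hr)]
          · have hor : ¬ (v ∈ path ++ [c] ∨ pvRem rel (path ++ [c]) v ≠ 0) := by
              rintro (h | h)
              · exact hvp' h
              · exact hr h
            rw [if_neg hr, if_neg hor]

lemma pvTopA (rel : List (Int × Int)) :
    ∀ (l : List Int) (P : PySem.Dict Int (PySem.Set Int)) (res : PySem.Set (List Int)),
      pvInvA rel P [] →
      (l.foldl (fun st i => pvDfsA (pvAC rel) (pvDEP rel) ((pvAC rel).length + 1)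
          st.1 st.2 [] PySem.Set.empty i) (P, res)).2
        = pvAddAll res (l.flatMap (pvGenD rel ((pvAC rel).length + 1) [] ·))
      ∧ pvInvA rel (l.foldl (fun st i => pvDfsA (pvAC rel) (pvDEP rel) ((pvAC rel).length + 1)
          st.1 st.2 [] PySem.Set.empty i) (P, res)).1 [] := by
  have hs0 : pvSeenOK PySem.Set.empty [] := by
    intro x
    simp [PySem.Set.contains, PySem.Set.empty]
  intro l
  induction l with
  | nil =>
    intro P res hP
    exact ⟨by simp [pvAddAll], hP⟩
  | cons i l ih =>
    intro P res hP
    obtain ⟨h2, h1⟩ := pvDfsA_spec rel ((pvAC rel).length + 1) P res [] PySem.Set.empty i hP hs0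
    obtain ⟨g2, g1⟩ := ih (pvDfsA (pvAC rel) (pvDEP rel) ((pvAC rel).length + 1)
        P res [] PySem.Set.empty i).1
      (pvDfsA (pvAC rel) (pvDEP rel) ((pvAC rel).length + 1) P res [] PySem.Set.empty i).2 h1
    constructor
    · rw [List.foldl_cons]
      rw [g2, h2]
      simp [pvAddAll, List.foldl_append]
    · rw [List.foldl_cons]
      exact g1

lemma pvInvB_init (rel : List (Int × Int)) :
    pvInvB rel ((pvAC rel).foldl (fun d v =>
      PySem.Dict.insert d v (PySem.Set.len (PySem.Dict.getD (pvPRE rel) v PySem.Set.empty)))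
      PySem.Dict.empty) [] := by
  intro c
  rw [getD_foldl_insert]
  have hrem : pvRem rel [] c = ((pvPRE rel).getD c PySem.Set.empty).length := by
    unfold pvRem
    simp
  by_cases hc : c ∈ pvAC rel
  · rw [if_pos hc, hrem]
    simp [PySem.Set.len]
  · rw [if_neg hc, hrem, pvPRE_empty_of_not_ac rel c hc]
    simp

-- ===== VERDICT (by name: the statement is the Claim_ definition above) =====
theorem courseHelper_spec : Claim_equal_courseHelper := by
  intro rel _
  show courseHelper rel = courseHelper_alt rel
  have hb : rel.foldl (fun st e =>
      (PySem.Set.add (PySem.Set.add st.1 e.1) e.2,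
       PySem.Dict.modify st.2.1 e.1 PySem.Set.empty (fun s => PySem.Set.add s e.2),
       PySem.Dict.modify st.2.2 e.2 PySem.Set.empty (fun s => PySem.Set.add s e.1)))
      (PySem.Set.empty, PySem.Dict.empty, PySem.Dict.empty)
      = (pvAC rel, pvPRE rel, pvDEP rel) := pvBuild_split rel _ _ _
  simp only [courseHelper, courseHelper_alt, hb]
  by_cases hac : pvAC rel = []
  · simp [hac, PySem.Set.empty]
  · have hn : 0 < (pvAC rel).length := List.length_pos_of_ne_nil hac
    have hP0 : pvInvA rel (pvPRE rel) [] := by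
      intro c x
      simp
    obtain ⟨hA, -⟩ := pvTopA rel (pvAC rel) (pvPRE rel) PySem.Set.empty hP0
    rw [if_neg hac, hA]
    have hs0 : pvSeenOK PySem.Set.empty [] := by
      intro x
      simp [PySem.Set.contains, PySem.Set.empty]
    obtain ⟨hB, -⟩ := pvBtB_spec rel ((pvAC rel).length + 1) _ PySem.Set.empty [] PySem.Set.empty
      (pvAC rel) (pvInvB_init rel) hs0
    rw [hB]
    have hgen : (pvAC rel).flatMap (pvGenD rel ((pvAC rel).length + 1) [] ·)
        = pvGenB rel ((pvAC rel).length + 1) [] (pvAC rel) := by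
      conv_rhs => rw [pvGenB]
      rw [if_neg (show ¬ (([] : List Int).length = (pvAC rel).length) by simp; omega)]
      refine List.flatMap_congr ?_
      intro i hi
      rw [pvGen_agree rel (pvAC rel).length [] i List.nodup_nil (by simp) hi
        (by simp) hn (by omega)]
      by_cases hr : pvRem rel [] i ≠ 0
      · rw [if_pos hr, if_pos (Or.inr hr)]
      · rw [if_neg hr, if_neg (show ¬ (i ∈ ([] : List Int) ∨ pvRem rel [] i ≠ 0) by
          rintro (h | h)
          · exact absurd h (List.not_mem_nil)
          · exact hr h)]
    rw [hgen]
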